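-- pv_equiv track=rewrite | github.com/jesuszarate/CTCI | Interview/question.py | convert
-- ===== SOURCE A (Python) =====
-- def convert(A, B):
--
--     actions = []
--     for a in A:
--         value = contains(B, a)
--         if value:
--             if value[1] != a[1]:
--                actions.append([a[0], 'update', value[1]])
--         else:
--             actions.append([a[0], 'delete'])
--
--     for b in B:
--         actions.append([b[0], 'create', b[1]])
--
--     return actions
--
-- def contains(B, element):
--     # Remove element from B
--     for i in range(len(B)):
--         b = B[i]
--         if element[0] == b[0]:
--             del B[i]
--             return b
-- ===== SOURCE B (Python) =====
-- def convert(A, B):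
--     # Group B's values by key once, then match A's i-th occurrence of a key
--     # with B's i-th occurrence of that key; O(|A|+|B|) instead of O(|A|*|B|).
--     vals = {}
--     for k, v in B:
--         vals.setdefault(k, []).append(v)
--     seen = {}
--     actions = []
--     for k, v in A:
--         j = seen.get(k, 0)
--         seen[k] = j + 1
--         bl = vals.get(k, [])
--         if j < len(bl):
--             if bl[j] != v:
--                 actions.append([k, 'update', bl[j]])
--         else:
--             actions.append([k, 'delete'])
--     occ = {}
--     for k, v in B:
--         i = occ.get(k, 0)
--         occ[k] = i + 1
--         if i >= seen.get(k, 0):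
--             actions.append([k, 'create', v])
--     return actions
-- ===== Notes on version B (the rewrite author's own statement) =====
-- stated objective: faster
-- what changed: Replaced the per-A-element linear scan-and-delete of B (contains) by a one-pass grouping of B's values by key plus per-key occurrence counters, so the i-th A-occurrence of a key pairs with the i-th B-occurrence in O(1); creates are emitted by a second counter pass over B instead of iterating the mutated list. B does not mutate its argument B (A empties matched entries in place); return values agree everywhere.
import Mathlib
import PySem

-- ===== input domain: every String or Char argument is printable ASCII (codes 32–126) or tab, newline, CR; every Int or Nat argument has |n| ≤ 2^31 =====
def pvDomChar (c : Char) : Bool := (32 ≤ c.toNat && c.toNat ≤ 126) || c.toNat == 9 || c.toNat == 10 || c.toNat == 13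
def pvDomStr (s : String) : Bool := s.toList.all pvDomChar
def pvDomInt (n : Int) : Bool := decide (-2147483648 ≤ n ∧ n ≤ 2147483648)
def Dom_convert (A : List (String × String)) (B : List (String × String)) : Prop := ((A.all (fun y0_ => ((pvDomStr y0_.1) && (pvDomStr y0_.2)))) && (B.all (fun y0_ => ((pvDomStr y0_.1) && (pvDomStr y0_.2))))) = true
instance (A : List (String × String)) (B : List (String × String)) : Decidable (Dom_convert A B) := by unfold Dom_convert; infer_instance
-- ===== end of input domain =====

-- B groups B's values by key once and pairs occurrences with counters (O(|A|+|B|))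
-- instead of A's per-element scan-and-delete (O(|A|·|B|)); A mutates its argument B
-- in place (contains deletes matched entries) while B does not — the equivalence
-- proved here is about the RETURN value.

-- ===== PORT A =====
-- port of 'contains': scan B by index, delete and return the first pair with the
-- same key; returns (found pair or none, B after the deletion)
def containsA (el : String × String) : List (String × String) → Option (String × String) × List (String × String)
  | [] => (none, [])
  | b :: rest =>
    if el.1 == b.1 then (some b, rest)
    else
      let r := containsA el rest
      (r.1, b :: r.2)

def convert (A : List (String × String)) (B : List (String × String)) : List (List String) :=
  let st := A.foldl (fun (st : List (List String) × List (String × String)) a =>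
    let r := containsA a st.2
    match r.1 with
    | some value =>
        (if value.2 ≠ a.2 then st.1 ++ [[a.1, "update", value.2]] else st.1, r.2)
    | none => (st.1 ++ [[a.1, "delete"]], r.2)) ([], B)
  st.1 ++ st.2.map (fun b => [b.1, "create", b.2])

-- ===== PORT B =====
def convert_alt (A : List (String × String)) (B : List (String × String)) : List (List String) :=
  -- vals.setdefault(k, []).append(v)
  let vals : PySem.Dict String (List String) :=
    B.foldl (fun d p => d.modify p.1 [] (· ++ [p.2])) PySem.Dict.empty
  -- first loop: over A, with the 'seen' counter dict
  let st := A.foldl (fun (st : List (List String) × PySem.Dict String Int) p =>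
    let j := st.2.getD p.1 0
    let seen := st.2.insert p.1 (j + 1)
    let bl := vals.getD p.1 []
    if j < (bl.length : Int) then
      (if PySem.List.pyGetD bl j "" ≠ p.2
         then st.1 ++ [[p.1, "update", PySem.List.pyGetD bl j ""]] else st.1, seen)
    else (st.1 ++ [[p.1, "delete"]], seen)) ([], PySem.Dict.empty)
  -- second loop: over B, with the 'occ' counter dict
  (B.foldl (fun (st2 : List (List String) × PySem.Dict String Int) p =>
    let i := st2.2.getD p.1 0
    let occ := st2.2.insert p.1 (i + 1)
    (if i ≥ st.2.getD p.1 0 then st2.1 ++ [[p.1, "create", p.2]] else st2.1, occ))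
    (st.1, PySem.Dict.empty)).1

-- ===== PRECONDITION & SPEC =====
def Spec_convert (A : List (String × String)) (B : List (String × String)) (out : List (List String)) : Prop := out = convert_alt A B
instance (A : List (String × String)) (B : List (String × String)) (out : List (List String)) : Decidable (Spec_convert A B out) := by unfold Spec_convert; infer_instance

-- ===== CLAIM (what is proved, stated in full; the proofs are below) =====
def Claim_equal_convert : Prop := ∀ (A : List (String × String)) (B : List (String × String)), Dom_convert A B → Spec_convert A B (convert A B)

-- ===== LEMMAS AND PROOFS =====

-- bump a Nat-valued key counter
def pvBump (f : String → Nat) (k : String) : String → Nat :=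
  fun k' => if k' = k then f k' + 1 else f k'

-- B with, for each key k, its first (f k) occurrences removed
def pvDropOcc (f : String → Nat) : List (String × String) → List (String × String)
  | [] => []
  | b :: rest =>
    if f b.1 = 0 then b :: pvDropOcc f rest
    else pvDropOcc (fun k => if k = b.1 then f k - 1 else f k) rest

theorem pvDropOcc_zero (B : List (String × String)) : pvDropOcc (fun _ => 0) B = B := by
  induction B with
  | nil => rfl
  | cons b rest ih => simp [pvDropOcc, ih]

theorem containsA_dropOcc (el : String × String) (B : List (String × String))
    (f : String → Nat) :
    containsA el (pvDropOcc f B) =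
      ((B.filter (fun b => b.1 == el.1))[f el.1]?, pvDropOcc (pvBump f el.1) B) := by
  induction B generalizing f with
  | nil => simp [pvDropOcc, containsA]
  | cons b rest ih =>
    by_cases hb0 : f b.1 = 0
    · have hcons : pvDropOcc f (b :: rest) = b :: pvDropOcc f rest := by
        rw [pvDropOcc, if_pos hb0]
      by_cases hk : b.1 = el.1
      · have hbeq : (el.1 == b.1) = true := by simp [hk]
        have hL : containsA el (pvDropOcc f (b :: rest)) = (some b, pvDropOcc f rest) := by
          rw [hcons, containsA, if_pos hbeq]
        have hfil : (b :: rest).filter (fun x => x.1 == el.1)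
            = b :: rest.filter (fun x => x.1 == el.1) := by
          rw [List.filter_cons, if_pos (by simpa using hk)]
        have hidx : f el.1 = 0 := hk ▸ hb0
        have hbump : pvBump f el.1 b.1 = f b.1 + 1 := by simp [pvBump, hk]
        have hR2 : pvDropOcc (pvBump f el.1) (b :: rest) = pvDropOcc f rest := by
          rw [pvDropOcc, if_neg (by omega)]
          congr 1
          funext k
          simp only [pvBump, ← hk]
          by_cases h : k = b.1 <;> simp [h]
        rw [hL, hfil, hR2, hidx]
        simp
      · have hbeq : (el.1 == b.1) = false := by
          simp; exact fun h => hk h.symm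
        have hL : containsA el (pvDropOcc f (b :: rest))
            = ((containsA el (pvDropOcc f rest)).1, b :: (containsA el (pvDropOcc f rest)).2) := by
          rw [hcons, containsA, if_neg (by simp [hbeq])]
        have hfil : (b :: rest).filter (fun x => x.1 == el.1)
            = rest.filter (fun x => x.1 == el.1) := by
          rw [List.filter_cons, if_neg (by simpa using hk)]
        have hbump : pvBump f el.1 b.1 = f b.1 := by simp [pvBump, hk]
        have hR2 : pvDropOcc (pvBump f el.1) (b :: rest)
            = b :: pvDropOcc (pvBump f el.1) rest := by
          rw [pvDropOcc, if_pos (by rw [hbump]; exact hb0)]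
        rw [hL, ih f, hfil, hR2]
    · have hcons : pvDropOcc f (b :: rest)
          = pvDropOcc (fun k => if k = b.1 then f k - 1 else f k) rest := by
        rw [pvDropOcc, if_neg hb0]
      by_cases hk : b.1 = el.1
      · have hidxf : (if el.1 = b.1 then f el.1 - 1 else f el.1) = f el.1 - 1 := by
          rw [if_pos hk.symm]
        have hfb : f el.1 ≠ 0 := by rw [← hk]; exact hb0
        have hfil : (b :: rest).filter (fun x => x.1 == el.1)
            = b :: rest.filter (fun x => x.1 == el.1) := by
          rw [List.filter_cons, if_pos (by simpa using hk)]
        have hgetc : ((b :: rest.filter (fun x => x.1 == el.1)))[f el.1]?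
            = (rest.filter (fun x => x.1 == el.1))[f el.1 - 1]? := by
          rcases Nat.exists_eq_succ_of_ne_zero hfb with ⟨m, hm⟩
          rw [hm]; simp
        have hbump : pvBump f el.1 b.1 = f b.1 + 1 := by simp [pvBump, hk]
        have hR2 : pvDropOcc (pvBump f el.1) (b :: rest)
            = pvDropOcc (pvBump (fun k => if k = b.1 then f k - 1 else f k) el.1) rest := by
          rw [pvDropOcc, if_neg (by omega)]
          congr 1
          funext k
          simp only [pvBump]
          by_cases h : k = b.1
          · have h2 : k = el.1 := h.trans hk
            simp [h, ← hk]
            omega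
          · have h2 : k ≠ el.1 := fun he => h (he.trans hk.symm)
            simp [h, ← hk]
        rw [hcons, ih, hidxf, hfil, hgetc, hR2]
      · have hidxf : (if el.1 = b.1 then f el.1 - 1 else f el.1) = f el.1 := by
          rw [if_neg (fun h => hk h.symm)]
        have hfil : (b :: rest).filter (fun x => x.1 == el.1)
            = rest.filter (fun x => x.1 == el.1) := by
          rw [List.filter_cons, if_neg (by simpa using hk)]
        have hbump : pvBump f el.1 b.1 = f b.1 := by simp [pvBump, hk]
        have hR2 : pvDropOcc (pvBump f el.1) (b :: rest)
            = pvDropOcc (pvBump (fun k => if k = b.1 then f k - 1 else f k) el.1) rest := by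
          rw [pvDropOcc, if_neg (by rw [hbump]; exact hb0)]
          congr 1
          funext k
          simp only [pvBump]
          have hk' : ¬ el.1 = b.1 := fun h => hk h.symm
          by_cases h : k = b.1
          · have h2 : ¬ k = el.1 := by rw [h]; exact hk
            simp [h, hk]
          · by_cases h2 : k = el.1 <;> simp [h, h2, hk']
        rw [hcons, ih, hidxf, hfil, hR2]

-- functional model of the A-loop over A, parameterized by the original B
def pvModel (B : List (String × String)) :
    List (String × String) → (String → Nat) → List (List String) × (String → Nat)
  | [], f => ([], f)
  | a :: rest, f =>
    let bl := (B.filter (fun b => b.1 == a.1)).map (·.2)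
    let step :=
      match bl[f a.1]? with
      | some w => if w ≠ a.2 then [[a.1, "update", w]] else []
      | none => [[a.1, "delete"]]
    let r := pvModel B rest (pvBump f a.1)
    (step ++ r.1, r.2)

-- 'convert' with its lets zeta-reduced (definitional)
theorem convert_unfold (A B : List (String × String)) :
    convert A B
    = (List.foldl (fun (st : List (List String) × List (String × String)) a =>
      match (containsA a st.2).1 with
      | some value =>
          (if value.2 ≠ a.2 then st.1 ++ [[a.1, "update", value.2]] else st.1, (containsA a st.2).2)
      | none => (st.1 ++ [[a.1, "delete"]], (containsA a st.2).2)) ([], B) A).1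
      ++ (List.foldl (fun (st : List (List String) × List (String × String)) a =>
      match (containsA a st.2).1 with
      | some value =>
          (if value.2 ≠ a.2 then st.1 ++ [[a.1, "update", value.2]] else st.1, (containsA a st.2).2)
      | none => (st.1 ++ [[a.1, "delete"]], (containsA a st.2).2)) ([], B) A).2.map (fun b => [b.1, "create", b.2]) := rfl

-- 'convert_alt' with its lets zeta-reduced (definitional)
theorem convert_alt_unfold (A B : List (String × String)) :
    convert_alt A B
    = (List.foldl (fun (st2 : List (List String) × PySem.Dict String Int) p =>
      (if st2.2.getD p.1 0 ≥ (List.foldl (fun (st : List (List String) × PySem.Dict String Int) p =>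
      if st.2.getD p.1 0 < ((((B.foldl (fun d p => d.modify p.1 [] (· ++ [p.2])) PySem.Dict.empty).getD p.1 []).length : Int)) then
        (if PySem.List.pyGetD ((B.foldl (fun d p => d.modify p.1 [] (· ++ [p.2])) PySem.Dict.empty).getD p.1 []) (st.2.getD p.1 0) "" ≠ p.2
           then st.1 ++ [[p.1, "update", PySem.List.pyGetD ((B.foldl (fun d p => d.modify p.1 [] (· ++ [p.2])) PySem.Dict.empty).getD p.1 []) (st.2.getD p.1 0) ""]]
           else st.1,
         st.2.insert p.1 (st.2.getD p.1 0 + 1))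
      else (st.1 ++ [[p.1, "delete"]], st.2.insert p.1 (st.2.getD p.1 0 + 1))) ([], PySem.Dict.empty) A).2.getD p.1 0 then st2.1 ++ [[p.1, "create", p.2]] else st2.1,
       st2.2.insert p.1 (st2.2.getD p.1 0 + 1))) ((List.foldl (fun (st : List (List String) × PySem.Dict String Int) p =>
      if st.2.getD p.1 0 < ((((B.foldl (fun d p => d.modify p.1 [] (· ++ [p.2])) PySem.Dict.empty).getD p.1 []).length : Int)) then
        (if PySem.List.pyGetD ((B.foldl (fun d p => d.modify p.1 [] (· ++ [p.2])) PySem.Dict.empty).getD p.1 []) (st.2.getD p.1 0) "" ≠ p.2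
           then st.1 ++ [[p.1, "update", PySem.List.pyGetD ((B.foldl (fun d p => d.modify p.1 [] (· ++ [p.2])) PySem.Dict.empty).getD p.1 []) (st.2.getD p.1 0) ""]]
           else st.1,
         st.2.insert p.1 (st.2.getD p.1 0 + 1))
      else (st.1 ++ [[p.1, "delete"]], st.2.insert p.1 (st.2.getD p.1 0 + 1))) ([], PySem.Dict.empty) A).1, PySem.Dict.empty) B).1 := rfl

-- A-side loop characterization
theorem pvLoopA (B A : List (String × String)) (acts : List (List String)) (f : String → Nat) :
    List.foldl (fun (st : List (List String) × List (String × String)) a =>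
      match (containsA a st.2).1 with
      | some value =>
          (if value.2 ≠ a.2 then st.1 ++ [[a.1, "update", value.2]] else st.1, (containsA a st.2).2)
      | none => (st.1 ++ [[a.1, "delete"]], (containsA a st.2).2)) (acts, pvDropOcc f B) A
    = (acts ++ (pvModel B A f).1, pvDropOcc (pvModel B A f).2 B) := by
  induction A generalizing acts f with
  | nil => simp [pvModel]
  | cons a rest ih =>
    rw [List.foldl_cons]
    simp only [containsA_dropOcc a B f]
    cases hfe : (B.filter (fun b => b.1 == a.1))[f a.1]? with
    | none =>
      have hbl : ((B.filter (fun b => b.1 == a.1)).map (·.2))[f a.1]? = none := by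
        simp [List.getElem?_map, hfe]
      simp only [pvModel, hbl]
      rw [ih]
      simp
    | some w =>
      have hbl : ((B.filter (fun b => b.1 == a.1)).map (·.2))[f a.1]? = some w.2 := by
        simp [List.getElem?_map, hfe]
      by_cases hv : w.2 ≠ a.2
      · simp only [pvModel, hbl, if_pos hv]
        rw [ih]
        simp
      · simp only [pvModel, hbl, if_neg hv]
        rw [ih]
        simp

-- B-side first loop matches the model
theorem pvLoopB (B A : List (String × String)) (acts : List (List String))
    (f : String → Nat) (d : PySem.Dict String Int)
    (h : ∀ k, d.getD k 0 = (f k : Int)) :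
    (List.foldl (fun (st : List (List String) × PySem.Dict String Int) p =>
      if st.2.getD p.1 0 < ((((B.foldl (fun d p => d.modify p.1 [] (· ++ [p.2])) PySem.Dict.empty).getD p.1 []).length : Int)) then
        (if PySem.List.pyGetD ((B.foldl (fun d p => d.modify p.1 [] (· ++ [p.2])) PySem.Dict.empty).getD p.1 []) (st.2.getD p.1 0) "" ≠ p.2
           then st.1 ++ [[p.1, "update", PySem.List.pyGetD ((B.foldl (fun d p => d.modify p.1 [] (· ++ [p.2])) PySem.Dict.empty).getD p.1 []) (st.2.getD p.1 0) ""]]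
           else st.1,
         st.2.insert p.1 (st.2.getD p.1 0 + 1))
      else (st.1 ++ [[p.1, "delete"]], st.2.insert p.1 (st.2.getD p.1 0 + 1))) (acts, d) A).1 = acts ++ (pvModel B A f).1
    ∧ ∀ k, (List.foldl (fun (st : List (List String) × PySem.Dict String Int) p =>
      if st.2.getD p.1 0 < ((((B.foldl (fun d p => d.modify p.1 [] (· ++ [p.2])) PySem.Dict.empty).getD p.1 []).length : Int)) then
        (if PySem.List.pyGetD ((B.foldl (fun d p => d.modify p.1 [] (· ++ [p.2])) PySem.Dict.empty).getD p.1 []) (st.2.getD p.1 0) "" ≠ p.2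
           then st.1 ++ [[p.1, "update", PySem.List.pyGetD ((B.foldl (fun d p => d.modify p.1 [] (· ++ [p.2])) PySem.Dict.empty).getD p.1 []) (st.2.getD p.1 0) ""]]
           else st.1,
         st.2.insert p.1 (st.2.getD p.1 0 + 1))
      else (st.1 ++ [[p.1, "delete"]], st.2.insert p.1 (st.2.getD p.1 0 + 1))) (acts, d) A).2.getD k 0 = ((pvModel B A f).2 k : Int) := by
  induction A generalizing acts f d with
  | nil => exact ⟨by simp [pvModel], fun k => by simpa [pvModel] using h k⟩
  | cons a rest ih =>
    have hvals : (B.foldl (fun d p => d.modify p.1 [] (· ++ [p.2])) PySem.Dict.empty).getD a.1 [] = (B.filter (fun p => p.1 == a.1)).map (·.2) := by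
      rw [PySem.Dict.getD_foldl_modify_append]
      simp
    have hj : d.getD a.1 0 = (f a.1 : Int) := h a.1
    have hd' : ∀ k, (d.insert a.1 (d.getD a.1 0 + 1)).getD k 0 = ((pvBump f a.1) k : Int) := by
      intro k
      rw [PySem.Dict.getD_insert]
      by_cases hk : k = a.1
      · simp [hk, pvBump, hj]
      · simp [hk, pvBump, h k]
    set bl := (B.filter (fun p => p.1 == a.1)).map (·.2) with hbl
    have hmod2 : (pvModel B (a :: rest) f).2 = (pvModel B rest (pvBump f a.1)).2 := by
      simp [pvModel]
    simp only [List.foldl_cons]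
    by_cases hlt : f a.1 < bl.length
    · have hcond : d.getD a.1 0 < (((B.foldl (fun d p => d.modify p.1 [] (· ++ [p.2])) PySem.Dict.empty).getD a.1 []).length : Int) := by
        rw [hvals, hj]; exact_mod_cast hlt
      have hget : PySem.List.pyGetD ((B.foldl (fun d p => d.modify p.1 [] (· ++ [p.2])) PySem.Dict.empty).getD a.1 []) (d.getD a.1 0) "" = bl[f a.1] := by
        rw [hvals, hj]
        rw [show ((f a.1 : Int)) = ((f a.1 : Nat) : Int) from rfl]
        rw [PySem.List.pyGetD_natCast]
        exact List.getD_eq_getElem bl "" hlt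
      have hsome : bl[f a.1]? = some bl[f a.1] := List.getElem?_eq_getElem hlt
      rw [if_pos hcond, hget]
      by_cases hv : bl[f a.1] ≠ a.2
      · rw [if_pos hv]
        have hrec := ih (acts ++ [[a.1, "update", bl[f a.1]]]) (pvBump f a.1)
          (d.insert a.1 (d.getD a.1 0 + 1)) hd'
        constructor
        · rw [hrec.1]
          simp [pvModel, ← hbl, hsome, hv]
        · intro k
          rw [hmod2]
          exact hrec.2 k
      · rw [if_neg hv]
        have hrec := ih acts (pvBump f a.1) (d.insert a.1 (d.getD a.1 0 + 1)) hd'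
        constructor
        · rw [hrec.1]
          simp [pvModel, ← hbl, hsome, hv]
        · intro k
          rw [hmod2]
          exact hrec.2 k
    · have hcond : ¬ (d.getD a.1 0 < (((B.foldl (fun d p => d.modify p.1 [] (· ++ [p.2])) PySem.Dict.empty).getD a.1 []).length : Int)) := by
        rw [hvals, hj]
        exact_mod_cast hlt
      have hnone : bl[f a.1]? = none := by
        rw [List.getElem?_eq_none_iff]; omega
      rw [if_neg hcond]
      have hrec := ih (acts ++ [[a.1, "delete"]]) (pvBump f a.1)
        (d.insert a.1 (d.getD a.1 0 + 1)) hd'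
      constructor
      · rw [hrec.1]
        simp [pvModel, ← hbl, hnone]
      · intro k
        rw [hmod2]
        exact hrec.2 k

-- B-side second loop (creates) equals mapping over the un-matched remainder
theorem pvLoopC (dfin : PySem.Dict String Int) (F : String → Nat)
    (hF : ∀ k, dfin.getD k 0 = (F k : Int))
    (B : List (String × String)) (acts : List (List String))
    (g : String → Nat) (occd : PySem.Dict String Int)
    (hg : ∀ k, occd.getD k 0 = (g k : Int)) :
    (List.foldl (fun (st2 : List (List String) × PySem.Dict String Int) p =>
      (if st2.2.getD p.1 0 ≥ dfin.getD p.1 0 then st2.1 ++ [[p.1, "create", p.2]] else st2.1,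
       st2.2.insert p.1 (st2.2.getD p.1 0 + 1))) (acts, occd) B).1
    = acts ++ (pvDropOcc (fun k => F k - g k) B).map (fun b => [b.1, "create", b.2]) := by
  induction B generalizing acts g occd with
  | nil => simp [pvDropOcc]
  | cons b rest ih =>
    have hocc' : ∀ k, (occd.insert b.1 (occd.getD b.1 0 + 1)).getD k 0 = ((pvBump g b.1) k : Int) := by
      intro k
      rw [PySem.Dict.getD_insert]
      by_cases hk : k = b.1
      · simp [hk, pvBump, hg b.1]
      · simp [hk, pvBump, hg k]
    simp only [List.foldl_cons]
    by_cases hge : F b.1 ≤ g b.1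
    · have hcond : occd.getD b.1 0 ≥ dfin.getD b.1 0 := by
        rw [hg, hF]; exact_mod_cast hge
      rw [if_pos hcond]
      rw [ih (acts ++ [[b.1, "create", b.2]]) (pvBump g b.1) _ hocc']
      have hkeep : pvDropOcc (fun k => F k - g k) (b :: rest)
          = b :: pvDropOcc (fun k => F k - g k) rest := by
        have h0 : F b.1 - g b.1 = 0 := by omega
        rw [pvDropOcc, if_pos h0]
      have hfun : (fun k => F k - pvBump g b.1 k) = (fun k => F k - g k) := by
        funext k; by_cases hk : k = b.1 <;> simp [pvBump, hk] <;> omega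
      rw [hfun, hkeep]
      simp
    · have hcond : ¬ (occd.getD b.1 0 ≥ dfin.getD b.1 0) := by
        rw [hg, hF]
        exact_mod_cast hge
      rw [if_neg hcond]
      rw [ih acts (pvBump g b.1) _ hocc']
      have hdrop : pvDropOcc (fun k => F k - g k) (b :: rest)
          = pvDropOcc (fun k => if k = b.1 then (F k - g k) - 1 else F k - g k) rest := by
        have h0 : ¬ (F b.1 - g b.1 = 0) := by omega
        rw [pvDropOcc, if_neg h0]
      have hfun : (fun k => F k - pvBump g b.1 k) = (fun k => if k = b.1 then (F k - g k) - 1 else F k - g k) := by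
        funext k; by_cases hk : k = b.1 <;> simp [pvBump, hk] <;> omega
      rw [hdrop, ← hfun]

-- ===== VERDICT (by name: the statement is the Claim_ definition above) =====
set_option maxHeartbeats 8000000 in
theorem convert_spec : Claim_equal_convert := by
  intro A B _
  unfold Spec_convert
  rw [convert_unfold, convert_alt_unfold]
  have h0 : ∀ k : String, (PySem.Dict.empty : PySem.Dict String Int).getD k 0
      = (((fun (_ : String) => (0 : Nat)) k : Nat) : Int) := by
    intro k; simp [PySem.Dict.getD_empty]
  have hA := pvLoopA B A [] (fun _ => 0)
  rw [pvDropOcc_zero] at hA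
  obtain ⟨hB1, hB2⟩ := pvLoopB B A [] (fun _ => 0) PySem.Dict.empty h0
  set G := List.foldl (fun (st : List (List String) × PySem.Dict String Int) p =>
      if st.2.getD p.1 0 < ((((B.foldl (fun d p => d.modify p.1 [] (· ++ [p.2])) PySem.Dict.empty).getD p.1 []).length : Int)) then
        (if PySem.List.pyGetD ((B.foldl (fun d p => d.modify p.1 [] (· ++ [p.2])) PySem.Dict.empty).getD p.1 []) (st.2.getD p.1 0) "" ≠ p.2
           then st.1 ++ [[p.1, "update", PySem.List.pyGetD ((B.foldl (fun d p => d.modify p.1 [] (· ++ [p.2])) PySem.Dict.empty).getD p.1 []) (st.2.getD p.1 0) ""]]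
           else st.1,
         st.2.insert p.1 (st.2.getD p.1 0 + 1))
      else (st.1 ++ [[p.1, "delete"]], st.2.insert p.1 (st.2.getD p.1 0 + 1))) ([], PySem.Dict.empty) A with hG
  have hC := pvLoopC G.2 ((pvModel B A (fun _ => 0)).2) hB2 B G.1 (fun _ => 0) PySem.Dict.empty h0
  rw [hC]
  rw [hB1]
  rw [hA]
  simp
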